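-- pv_equiv track=rewrite | github.com/yeagerai/genworlds | genworlds/interfaces/cli/formatted_buffer.py | apply_style
-- ===== SOURCE A (Python) =====
-- def apply_style(style, content):
--     for el in style.split(" "):
--         if el.startswith("fg:"):
--             content = f'<style fg="{el[3:]}">{content}</style>'
--         elif el.startswith("bg:"):
--             content = f'<style bg="{el[3:]}">{content}</style>'
--         elif el == "bold":
--             content = f"<b>{content}</b>"
--         elif el == "italic":
--             content = f"<i>{content}</i>"
--         elif el == "underline":
--             content = f"<u>{content}</u>"
--         elif el == "blink":
--             content = f"<blink>{content}</blink>"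
--         elif el == "reverse":
--             content = f"<reverse>{content}</reverse>"
--         elif el == "strike":
--             content = f"<strike>{content}</strike>"
--     return content
-- ===== SOURCE B (Python) =====
-- TAGS = {
--     "bold": ("<b>", "</b>"),
--     "italic": ("<i>", "</i>"),
--     "underline": ("<u>", "</u>"),
--     "blink": ("<blink>", "</blink>"),
--     "reverse": ("<reverse>", "</reverse>"),
--     "strike": ("<strike>", "</strike>"),
-- }
--
--
-- def apply_style(style, content):
--     prefix = ""
--     suffix = ""
--     for el in style.split(" "):
--         if el.startswith("fg:"):
--             pair = ('<style fg="' + el[3:] + '">', "</style>")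
--         elif el.startswith("bg:"):
--             pair = ('<style bg="' + el[3:] + '">', "</style>")
--         else:
--             pair = TAGS.get(el)
--         if pair is not None:
--             prefix = pair[0] + prefix
--             suffix = suffix + pair[1]
--     return prefix + content + suffix
-- ===== Notes on version B (the rewrite author's own statement) =====
-- stated objective: simpler
-- what changed: Instead of re-wrapping the whole content string at every token, B makes one pass over the tokens accumulating an opening-tag prefix (prepended) and a closing-tag suffix (appended), with the fixed keywords looked up in a dict, and concatenates prefix + content + suffix once.
import Mathlib
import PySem

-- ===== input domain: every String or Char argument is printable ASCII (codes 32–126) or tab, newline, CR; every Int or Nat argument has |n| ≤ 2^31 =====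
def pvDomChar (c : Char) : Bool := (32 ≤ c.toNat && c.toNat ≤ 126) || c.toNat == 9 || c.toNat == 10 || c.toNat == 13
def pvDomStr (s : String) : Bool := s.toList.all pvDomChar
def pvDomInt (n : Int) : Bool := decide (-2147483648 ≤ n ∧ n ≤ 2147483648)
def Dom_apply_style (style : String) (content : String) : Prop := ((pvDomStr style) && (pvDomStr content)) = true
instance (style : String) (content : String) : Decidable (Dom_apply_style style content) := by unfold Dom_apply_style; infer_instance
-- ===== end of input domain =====

-- B builds an opening prefix and a closing suffix in one pass (keyword pairs from a dict)
-- and concatenates once, instead of A's repeated re-wrapping of content; objective: simpler decomposition.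

-- ===== PORT A =====
-- A's loop body: the if/elif chain re-wrapping content (strings handled as List Char; f-string = concatenation)
def applyStyleStepA (content : List Char) (el : String) : List Char :=
  if PySem.Str.startswith el "fg:" then
    "<style fg=\"".toList ++ (PySem.Str.slice el (some 3) none).toList ++ "\">".toList ++ content ++ "</style>".toList
  else if PySem.Str.startswith el "bg:" then
    "<style bg=\"".toList ++ (PySem.Str.slice el (some 3) none).toList ++ "\">".toList ++ content ++ "</style>".toList
  else if el = "bold" then "<b>".toList ++ content ++ "</b>".toList
  else if el = "italic" then "<i>".toList ++ content ++ "</i>".toList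
  else if el = "underline" then "<u>".toList ++ content ++ "</u>".toList
  else if el = "blink" then "<blink>".toList ++ content ++ "</blink>".toList
  else if el = "reverse" then "<reverse>".toList ++ content ++ "</reverse>".toList
  else if el = "strike" then "<strike>".toList ++ content ++ "</strike>".toList
  else content

def apply_style (style : String) (content : String) : String :=
  String.ofList (((PySem.Str.split? style " ").getD []).foldl applyStyleStepA content.toList)

-- ===== PORT B =====
-- the TAGS dict of Source B
def pvTags : PySem.Dict String (List Char × List Char) :=
  PySem.Dict.ofList
    [("bold", ("<b>".toList, "</b>".toList)),
     ("italic", ("<i>".toList, "</i>".toList)),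
     ("underline", ("<u>".toList, "</u>".toList)),
     ("blink", ("<blink>".toList, "</blink>".toList)),
     ("reverse", ("<reverse>".toList, "</reverse>".toList)),
     ("strike", ("<strike>".toList, "</strike>".toList))]

-- Source B: compute the (open, close) pair for a token, none if the token styles nothing
def pvPairOf (el : String) : Option (List Char × List Char) :=
  if PySem.Str.startswith el "fg:" then
    some ("<style fg=\"".toList ++ (PySem.Str.slice el (some 3) none).toList ++ "\">".toList, "</style>".toList)
  else if PySem.Str.startswith el "bg:" then
    some ("<style bg=\"".toList ++ (PySem.Str.slice el (some 3) none).toList ++ "\">".toList, "</style>".toList)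
  else pvTags.get? el

-- Source B: prepend the opening tag to prefix, append the closing tag to suffix
def pvStepB (ps : List Char × List Char) (el : String) : List Char × List Char :=
  match pvPairOf el with
  | some (o, c) => (o ++ ps.1, ps.2 ++ c)
  | none => ps

def apply_style_alt (style : String) (content : String) : String :=
  let ps := ((PySem.Str.split? style " ").getD []).foldl pvStepB ([], [])
  String.ofList (ps.1 ++ content.toList ++ ps.2)

-- ===== PRECONDITION & SPEC =====
def Spec_apply_style (style : String) (content : String) (out : String) : Prop := out = apply_style_alt style content
instance (style : String) (content : String) (out : String) : Decidable (Spec_apply_style style content out) := by unfold Spec_apply_style; infer_instance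

-- ===== CLAIM (what is proved, stated in full; the proofs are below) =====
def Claim_equal_apply_style : Prop := ∀ (style : String) (content : String), Dom_apply_style style content → Spec_apply_style style content (apply_style style content)

-- ===== LEMMAS AND PROOFS =====

-- A's step is: wrap with the pair B computes (if any)
theorem stepA_eq_pair (c : List Char) (el : String) :
    applyStyleStepA c el =
      match pvPairOf el with
      | some (o, cl) => o ++ c ++ cl
      | none => c := by
  unfold applyStyleStepA pvPairOf
  split_ifs with h1 h2 h3 h4 h5 h6 h7 h8
  · simp [List.append_assoc]
  · simp [List.append_assoc]
  · subst h3; rw [show pvTags.get? "bold" = some ("<b>".toList, "</b>".toList) from rfl]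
  · subst h4; rw [show pvTags.get? "italic" = some ("<i>".toList, "</i>".toList) from rfl]
  · subst h5; rw [show pvTags.get? "underline" = some ("<u>".toList, "</u>".toList) from rfl]
  · subst h6; rw [show pvTags.get? "blink" = some ("<blink>".toList, "</blink>".toList) from rfl]
  · subst h7; rw [show pvTags.get? "reverse" = some ("<reverse>".toList, "</reverse>".toList) from rfl]
  · subst h8; rw [show pvTags.get? "strike" = some ("<strike>".toList, "</strike>".toList) from rfl]
  · have hn : pvTags.get? el = none := by
      rw [show pvTags = PySem.Dict.mk
        [("bold", ("<b>".toList, "</b>".toList)),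
         ("italic", ("<i>".toList, "</i>".toList)),
         ("underline", ("<u>".toList, "</u>".toList)),
         ("blink", ("<blink>".toList, "</blink>".toList)),
         ("reverse", ("<reverse>".toList, "</reverse>".toList)),
         ("strike", ("<strike>".toList, "</strike>".toList))] from by decide]
      simp [PySem.Dict.get?, Ne.symm h3, Ne.symm h4, Ne.symm h5, Ne.symm h6, Ne.symm h7, Ne.symm h8]
    rw [hn]

-- folding B's step from (p, s) just wraps the fold from ([], [])
theorem foldB_shift (els : List String) (p s : List Char) :
    els.foldl pvStepB (p, s) =
      ((els.foldl pvStepB ([], [])).1 ++ p, s ++ (els.foldl pvStepB ([], [])).2) := by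
  induction els generalizing p s with
  | nil => simp
  | cons e els ih =>
    simp only [List.foldl_cons]
    cases h : pvPairOf e with
    | none =>
      simp only [pvStepB, h]
      exact ih p s
    | some oc =>
      obtain ⟨o, cl⟩ := oc
      simp only [pvStepB, h, List.append_nil, List.nil_append]
      rw [ih (o ++ p) (s ++ cl), ih o cl]
      simp [List.append_assoc]

-- the main invariant: A's repeated wrapping equals B's prefix/suffix sandwich
theorem foldA_eq_foldB (els : List String) (c : List Char) :
    els.foldl applyStyleStepA c =
      (els.foldl pvStepB ([], [])).1 ++ c ++ (els.foldl pvStepB ([], [])).2 := by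
  induction els generalizing c with
  | nil => simp
  | cons e els ih =>
    simp only [List.foldl_cons]
    rw [ih (applyStyleStepA c e), stepA_eq_pair]
    cases h : pvPairOf e with
    | none => simp [pvStepB, h]
    | some oc =>
      obtain ⟨o, cl⟩ := oc
      simp only [pvStepB, h, List.append_nil, List.nil_append]
      rw [foldB_shift els o cl]
      simp [List.append_assoc]

-- ===== VERDICT (by name: the statement is the Claim_ definition above) =====
theorem apply_style_spec : Claim_equal_apply_style := by
  intro style content _
  unfold Spec_apply_style apply_style apply_style_alt
  rw [foldA_eq_foldB]
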